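-- pv_equiv track=rewrite | github.com/PuffoTrillionarioGonePublic/CA-Project | gpu-exe/generate-launchers.py | gen_few_pairs_blk_tpb
-- ===== SOURCE A (Python) =====
-- def gen_few_pairs_blk_tpb(thread_N, max_tpb):
--     ans = []
--     # initially one block with one thread
--     blk = 1; tpb = 1;
--     for pow in range(thread_N+1):
--         ans.append((blk, tpb))
--         if tpb < max_tpb:
--             tpb *= 2
--         else:
--             blk *=2
--     return ans
-- ===== SOURCE B (Python) =====
-- def gen_few_pairs_blk_tpb(thread_N, max_tpb):
--     # crossover count: number of doublings before tpb reaches/exceeds max_tpb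
--     m = 0
--     t = 1
--     while t < max_tpb:
--         t *= 2
--         m += 1
--     return [(1 << max(0, i - m), 1 << min(i, m)) for i in range(thread_N + 1)]
-- ===== Notes on version B (the rewrite author's own statement) =====
-- stated objective: simpler
-- what changed: Replaces the stateful blk/tpb loop by first computing the crossover count m (doublings until tpb would reach max_tpb) and then emitting each pair (2**max(0,i-m), 2**min(i,m)) directly from its index via a comprehension.
import Mathlib
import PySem

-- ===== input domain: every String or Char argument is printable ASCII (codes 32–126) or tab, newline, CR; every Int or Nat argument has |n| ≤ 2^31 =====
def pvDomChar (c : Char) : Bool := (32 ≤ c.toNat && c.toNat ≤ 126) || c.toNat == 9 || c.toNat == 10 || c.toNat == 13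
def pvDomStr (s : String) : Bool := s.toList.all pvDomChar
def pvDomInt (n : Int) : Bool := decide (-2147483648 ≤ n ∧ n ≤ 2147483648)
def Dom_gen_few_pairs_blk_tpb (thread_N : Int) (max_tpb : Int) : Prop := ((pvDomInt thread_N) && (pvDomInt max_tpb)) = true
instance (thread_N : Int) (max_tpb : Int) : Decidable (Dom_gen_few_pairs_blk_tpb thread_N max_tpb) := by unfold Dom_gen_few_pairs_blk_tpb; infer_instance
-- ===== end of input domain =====

-- B replaces the stateful blk/tpb loop by computing the crossover count m once and
-- emitting each pair directly from its index (objective: simpler).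

-- ===== PORT A =====
-- loop body of A: append (blk, tpb), then double tpb while tpb < max_tpb, else double blk
def pvStepA (max_tpb : Int) (s : List (Int × Int) × Int × Int) (_pow : Int) :
    List (Int × Int) × Int × Int :=
  let ans := s.1 ++ [(s.2.1, s.2.2)]
  if s.2.2 < max_tpb then (ans, s.2.1, 2 * s.2.2) else (ans, 2 * s.2.1, s.2.2)

def gen_few_pairs_blk_tpb (thread_N : Int) (max_tpb : Int) : List (Int × Int) :=
  ((PySem.List.pyRange 0 (thread_N + 1) 1).foldl (pvStepA max_tpb) ([], 1, 1)).1

-- ===== PORT B =====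
-- the 'while t < max_tpb: t *= 2; m += 1' loop of B (the hypothesis 1 ≤ t only justifies termination)
def pvMLoop (max_tpb : Int) (t : Int) (ht : 1 ≤ t) : Nat :=
  if h : t < max_tpb then pvMLoop max_tpb (2 * t) (by omega) + 1 else 0
termination_by (max_tpb - t).toNat
decreasing_by omega

-- '1 << k' is ported by hand as '2 ^ k.toNat'; exact, since both exponents are ≥ 0 here
def gen_few_pairs_blk_tpb_alt (thread_N : Int) (max_tpb : Int) : List (Int × Int) :=
  let m : Int := pvMLoop max_tpb 1 (le_refl 1)
  (PySem.List.pyRange 0 (thread_N + 1) 1).map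
    (fun i => ((2 : Int) ^ (max 0 (i - m)).toNat, (2 : Int) ^ (min i m).toNat))

-- ===== PRECONDITION & SPEC =====
def Spec_gen_few_pairs_blk_tpb (thread_N : Int) (max_tpb : Int) (out : List (Int × Int)) : Prop := out = gen_few_pairs_blk_tpb_alt thread_N max_tpb
instance (thread_N : Int) (max_tpb : Int) (out : List (Int × Int)) : Decidable (Spec_gen_few_pairs_blk_tpb thread_N max_tpb out) := by unfold Spec_gen_few_pairs_blk_tpb; infer_instance

-- ===== CLAIM (what is proved, stated in full; the proofs are below) =====
def Claim_equal_gen_few_pairs_blk_tpb : Prop := ∀ (thread_N : Int) (max_tpb : Int), Dom_gen_few_pairs_blk_tpb thread_N max_tpb → Spec_gen_few_pairs_blk_tpb thread_N max_tpb (gen_few_pairs_blk_tpb thread_N max_tpb)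

-- ===== LEMMAS AND PROOFS =====

-- characterisation of the while-loop count: t·2^k stays below max_tpb strictly before
-- the count and reaches it at the count
lemma pvMLoop_spec (max_tpb t : Int) (ht : 1 ≤ t) :
    (∀ k : Nat, k < pvMLoop max_tpb t ht → t * 2 ^ k < max_tpb) ∧
      max_tpb ≤ t * 2 ^ (pvMLoop max_tpb t ht) := by
  fun_induction pvMLoop max_tpb t ht with
  | case1 t ht h ih =>
    refine ⟨?_, ?_⟩
    · intro k hk
      cases k with
      | zero => simpa using h
      | succ k' =>
        have := ih.1 k' (by omega)
        have : t * 2 ^ (k' + 1) = 2 * t * 2 ^ k' := by ring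
        rw [this]; exact ih.1 k' (by omega)
    · have : t * 2 ^ (pvMLoop max_tpb (2 * t) (by omega) + 1)
            = 2 * t * 2 ^ (pvMLoop max_tpb (2 * t) (by omega)) := by ring
      rw [this]; exact ih.2
  | case2 t ht h =>
    exact ⟨fun k hk => absurd hk (by omega), by simpa using h⟩

-- loop invariant for A: starting at index j with blk = 2^(j-m), tpb = 2^(min j m),
-- the fold appends exactly the indexed pairs
lemma pvFoldA_inv (max_tpb : Int) (m : Nat)
    (hlt : ∀ k : Nat, k < m → (2 : Int) ^ k < max_tpb)
    (hge : max_tpb ≤ (2 : Int) ^ m) :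
    ∀ (L : List Int) (j : Nat) (acc : List (Int × Int)),
      (L.foldl (pvStepA max_tpb) (acc, (2 : Int) ^ (j - m), (2 : Int) ^ (min j m))).1
        = acc ++ (List.range L.length).map
            (fun k => ((2 : Int) ^ ((j + k) - m), (2 : Int) ^ (min (j + k) m))) := by
  intro L
  induction L with
  | nil => simp
  | cons x xs ih =>
    intro j acc
    by_cases hj : j < m
    · have hjm : j - m = 0 := by omega
      have hmin : min j m = j := by omega
      have hcond : (2 : Int) ^ (min j m) < max_tpb := by rw [hmin]; exact hlt j hj
      have hstep : pvStepA max_tpb (acc, (2 : Int) ^ (j - m), (2 : Int) ^ (min j m)) x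
          = (acc ++ [((2 : Int) ^ (j - m), (2 : Int) ^ (min j m))],
             (2 : Int) ^ ((j + 1) - m), (2 : Int) ^ (min (j + 1) m)) := by
        simp only [pvStepA, if_pos hcond, Prod.mk.injEq]
        refine ⟨trivial, ?_, ?_⟩
        · congr 1; omega
        · have h1 : min (j + 1) m = min j m + 1 := by omega
          rw [h1, pow_succ]; ring
      rw [List.foldl_cons, hstep, ih (j + 1) _]
      rw [List.length_cons, List.range_succ_eq_map, List.map_cons, List.map_map]
      simp only [List.append_assoc, List.singleton_append]
      refine congrArg (acc ++ ·) ?_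
      refine List.cons_eq_cons.mpr ⟨?_, ?_⟩
      · simp only [Prod.mk.injEq]
        exact ⟨rfl, rfl⟩
      · apply List.map_congr_left; intro k _
        simp only [Function.comp]
        simp only [Prod.mk.injEq]
        refine ⟨?_, ?_⟩ <;> first | rfl | (congr 1; omega)
    · have hmin : min j m = m := by omega
      have hcond : ¬ (2 : Int) ^ (min j m) < max_tpb := by rw [hmin]; exact not_lt.mpr hge
      have hstep : pvStepA max_tpb (acc, (2 : Int) ^ (j - m), (2 : Int) ^ (min j m)) x
          = (acc ++ [((2 : Int) ^ (j - m), (2 : Int) ^ (min j m))],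
             (2 : Int) ^ ((j + 1) - m), (2 : Int) ^ (min (j + 1) m)) := by
        simp only [pvStepA, if_neg hcond, Prod.mk.injEq]
        refine ⟨trivial, ?_, ?_⟩
        · have h1 : (j + 1) - m = (j - m) + 1 := by omega
          rw [h1, pow_succ]; ring
        · congr 1; omega
      rw [List.foldl_cons, hstep, ih (j + 1) _]
      rw [List.length_cons, List.range_succ_eq_map, List.map_cons, List.map_map]
      simp only [List.append_assoc, List.singleton_append]
      refine congrArg (acc ++ ·) ?_
      refine List.cons_eq_cons.mpr ⟨?_, ?_⟩
      · simp only [Prod.mk.injEq]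
        exact ⟨rfl, rfl⟩
      · apply List.map_congr_left; intro k _
        simp only [Function.comp]
        simp only [Prod.mk.injEq]
        refine ⟨?_, ?_⟩ <;> first | rfl | (congr 1; omega)

-- ===== VERDICT (by name: the statement is the Claim_ definition above) =====
theorem gen_few_pairs_blk_tpb_spec : Claim_equal_gen_few_pairs_blk_tpb := by
  intro thread_N max_tpb _
  unfold Spec_gen_few_pairs_blk_tpb gen_few_pairs_blk_tpb gen_few_pairs_blk_tpb_alt
  set m : Nat := pvMLoop max_tpb 1 (le_refl 1) with hm
  obtain ⟨hlt, hge⟩ := pvMLoop_spec max_tpb 1 (le_refl 1)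
  simp only [one_mul] at hlt hge
  have h0 : (([], 1, 1) : List (Int × Int) × Int × Int)
      = ([], (2 : Int) ^ (0 - m), (2 : Int) ^ (min 0 m)) := by
    simp
  rw [h0, pvFoldA_inv max_tpb m hlt hge _ 0 []]
  rw [PySem.List.pyRange_one]
  simp only [List.length_map, List.length_range, List.map_map, List.nil_append]
  apply List.map_congr_left; intro k _
  simp only [Function.comp]
  congr 1
  · congr 1; omega
  · congr 1; omega
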